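-- pv_equiv track=rewrite | github.com/rkeefe91/Zoho_new_contact_sync | Zoho_new_user_contact_sync.py | find_data
-- ===== SOURCE A (Python) =====
-- def find_data(data_list, account_name):
--     matching_data = []
--     for data in data_list:
--         if data[0] == account_name:
--             matching_data.append(data)
--     if len(matching_data) > 0:
--         if len(matching_data) == 1:
--             return matching_data[0]
--         else:
--             for data in matching_data:
--                 if data[1] == True:
--                     return data
--             # If no tuple with second element True, return first matching tuple
--             return matching_data[0]
--     else:
--         return None
-- ===== SOURCE B (Python) =====
-- def find_data(data_list, account_name):
--     first_match = None
--     for row in data_list: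
--         if row[0] == account_name:
--             if row[1] == True:
--                 return row
--             if first_match is None:
--                 first_match = row
--     return first_match
-- ===== Notes on version B (the rewrite author's own statement) =====
-- stated objective: simpler
-- what changed: Replaces A's collect-all-matches-then-rescan (with a length==1 special case) by a single pass keeping only the first match and returning immediately on a True-flagged match.
import Mathlib
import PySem

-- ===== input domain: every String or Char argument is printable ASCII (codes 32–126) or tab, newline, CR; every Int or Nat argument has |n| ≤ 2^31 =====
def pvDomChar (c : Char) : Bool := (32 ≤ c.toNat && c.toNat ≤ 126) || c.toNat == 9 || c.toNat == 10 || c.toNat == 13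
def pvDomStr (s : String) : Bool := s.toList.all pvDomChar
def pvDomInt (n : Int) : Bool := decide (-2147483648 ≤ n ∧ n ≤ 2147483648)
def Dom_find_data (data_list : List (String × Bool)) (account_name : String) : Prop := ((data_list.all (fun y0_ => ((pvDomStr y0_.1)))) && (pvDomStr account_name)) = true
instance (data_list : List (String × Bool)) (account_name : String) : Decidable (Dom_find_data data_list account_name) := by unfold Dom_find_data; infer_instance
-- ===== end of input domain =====

-- B is a single pass keeping the first match and returning early on a True flag, instead of
-- A's collect-all-matches list plus a second scan; simpler, same results.

-- ===== PORT A =====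
-- the second loop of A: 'for data in matching_data: if data[1] == True: return data' then fall through
def findTrueLoop : List (String × Bool) → Option (String × Bool)
  | [] => none
  | d :: rest => if d.2 == true then some d else findTrueLoop rest

def find_data (data_list : List (String × Bool)) (account_name : String) : Option (String × Bool) :=
  let matching_data := data_list.foldl (fun acc d => if d.1 == account_name then acc ++ [d] else acc) []
  if matching_data.length > 0 then
    if matching_data.length == 1 then matching_data.head?
    else
      match findTrueLoop matching_data with
      | some d => some d
      | none => matching_data.head?
  else none

-- ===== PORT B =====
-- B's single loop with the 'first_match' accumulator
def altLoop (account_name : String) : List (String × Bool) → Option (String × Bool) → Option (String × Bool)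
  | [], first_match => first_match
  | r :: rest, first_match =>
    if r.1 == account_name then
      if r.2 == true then some r
      else altLoop account_name rest (if first_match.isNone then some r else first_match)
    else altLoop account_name rest first_match

def find_data_alt (data_list : List (String × Bool)) (account_name : String) : Option (String × Bool) :=
  altLoop account_name data_list none

-- ===== PRECONDITION & SPEC =====
def Spec_find_data (data_list : List (String × Bool)) (account_name : String) (out : Option (String × Bool)) : Prop := out = find_data_alt data_list account_name
instance (data_list : List (String × Bool)) (account_name : String) (out : Option (String × Bool)) : Decidable (Spec_find_data data_list account_name out) := by unfold Spec_find_data; infer_instance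

-- ===== CLAIM (what is proved, stated in full; the proofs are below) =====
def Claim_equal_find_data : Prop := ∀ (data_list : List (String × Bool)) (account_name : String), Dom_find_data data_list account_name → Spec_find_data data_list account_name (find_data data_list account_name)

-- ===== LEMMAS AND PROOFS =====

-- A's filtering foldl builds exactly List.filter
theorem foldl_filter (p : String × Bool → Bool) (l acc : List (String × Bool)) :
    l.foldl (fun acc d => if p d then acc ++ [d] else acc) acc = acc ++ l.filter p := by
  induction l generalizing acc with
  | nil => simp
  | cons x xs ih =>
    by_cases h : p x <;> simp [List.foldl, h, ih]

-- A's result characterised: first True-flagged match, else the first match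
theorem find_data_char (data_list : List (String × Bool)) (account_name : String) :
    find_data data_list account_name =
      match findTrueLoop (data_list.filter (fun d => d.1 == account_name)) with
      | some d => some d
      | none => (data_list.filter (fun d => d.1 == account_name)).head? := by
  unfold find_data
  rw [foldl_filter]
  simp only [List.nil_append]
  cases h : data_list.filter (fun d => d.1 == account_name) with
  | nil => simp [findTrueLoop]
  | cons x rest =>
    cases rest with
    | nil =>
      by_cases hx : x.2 = true <;> simp [findTrueLoop, hx]
    | cons y ys => simp [List.length]

theorem altLoop_char (account_name : String) (l : List (String × Bool)) (fm : Option (String × Bool)) :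
    altLoop account_name l fm =
      match findTrueLoop (l.filter (fun d => d.1 == account_name)) with
      | some d => some d
      | none => fm.or (l.filter (fun d => d.1 == account_name)).head? := by
  induction l generalizing fm with
  | nil => simp [altLoop, findTrueLoop]
  | cons r rest ih =>
    by_cases hp : (r.1 == account_name) = true
    · by_cases hq : r.2 = true
      · simp [altLoop, hp, hq, findTrueLoop]
      · simp only [altLoop, hp, if_true, hq, List.filter, findTrueLoop]
        rw [ih]
        cases fm <;> simp [Option.or, List.head?]
    · simp [altLoop, hp, ih, List.filter]

-- ===== VERDICT (by name: the statement is the Claim_ definition above) =====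
theorem find_data_spec : Claim_equal_find_data := by
  intro data_list account_name _
  unfold Spec_find_data find_data_alt
  rw [find_data_char, altLoop_char]
  cases findTrueLoop (data_list.filter (fun d => d.1 == account_name)) <;> simp [Option.or]
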